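-- pv_equiv track=rewrite | github.com/yigalirani/leetcode | 1028_Recover_a_Tree_From_Preorder_Traversal.py | read_tokens
-- ===== SOURCE A (Python) =====
-- def read_tokens(s):
--     def push_token():
--         ans.append((int(''.join(acum_num)),acum_depth))
--     ans=[]
--     in_num=True
--     acum_num=[]
--     acum_depth=0
--     for c in s:
--         if in_num:
--             if c!='-':
--                 acum_num.append(c)
--             else:
--                 push_token()
--                 acum_depth=1
--                 acum_num=[]
--                 in_num=False
--         else:
--             if c=='-':
--                 acum_depth+=1
--             else:
--                 in_num=True;
--                 acum_num=[c]
--     push_token()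
--     return ans
-- ===== SOURCE B (Python) =====
-- def read_tokens(s):
--     out = []
--     depth = 0
--     rest = s
--     while True:
--         j = 0
--         while j < len(rest) and rest[j] != '-':
--             j += 1
--         out.append((int(rest[:j]), depth))
--         if j == len(rest):
--             return out
--         depth = 0
--         while j < len(rest) and rest[j] == '-':
--             j += 1
--             depth += 1
--         rest = rest[j:]
-- ===== Notes on version B (the rewrite author's own statement) =====
-- stated objective: alternative
-- what changed: Replaces A's char-by-char state machine (in_num flag, char accumulator, per-char depth counter) with a run-based scanner that slices out each maximal non-dash substring as the number text and uses each maximal dash run's length as the next depth.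
import Mathlib
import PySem

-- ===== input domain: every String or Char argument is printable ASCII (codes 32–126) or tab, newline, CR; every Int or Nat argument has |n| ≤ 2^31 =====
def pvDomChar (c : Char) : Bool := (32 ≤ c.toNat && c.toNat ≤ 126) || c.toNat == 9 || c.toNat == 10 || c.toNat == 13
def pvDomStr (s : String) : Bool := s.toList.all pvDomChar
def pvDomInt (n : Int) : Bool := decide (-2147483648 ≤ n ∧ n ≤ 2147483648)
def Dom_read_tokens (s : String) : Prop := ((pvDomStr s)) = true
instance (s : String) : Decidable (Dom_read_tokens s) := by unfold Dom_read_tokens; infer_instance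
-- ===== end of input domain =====

-- B replaces A's char-by-char state machine (in_num flag + accumulators) with a run-based
-- scanner that takes each maximal non-dash substring as the number text and each maximal
-- dash run's length as the next depth (objective: alternative decomposition, same cost).

-- ===== PORT A =====
-- push_token: append (int(''.join(acum_num)), acum_depth); none = ValueError of int()
def pushA (ans : Option (List (Int × Int))) (acum : List Char) (depth : Int) :
    Option (List (Int × Int)) :=
  match ans, PySem.Int.ofStr? (String.mk acum) with
  | some a, some v => some (a ++ [(v, depth)])
  | _, _ => none

-- one loop iteration of A over character c; state = (ans, in_num, acum_num, acum_depth)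
def stepA (st : Option (List (Int × Int)) × Bool × List Char × Int) (c : Char) :
    Option (List (Int × Int)) × Bool × List Char × Int :=
  match st with
  | (ans, inNum, acum, depth) =>
    if inNum then
      if c ≠ '-' then (ans, true, acum ++ [c], depth)
      else (pushA ans acum depth, false, [], 1)
    else
      if c = '-' then (ans, false, acum, depth + 1)
      else (ans, true, [c], depth)

def finishA (st : Option (List (Int × Int)) × Bool × List Char × Int) :
    Option (List (Int × Int)) :=
  match st with
  | (ans, _, acum, depth) => pushA ans acum depth

def read_tokens (s : String) : List (Int × Int) :=
  (finishA (s.toList.foldl stepA (some [], true, [], 0))).getD []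

-- ===== PORT B =====
-- B's while-loop: take the non-dash prefix as the number, then the dash run as the depth
def goB (rest : List Char) (depth : Int) (out : List (Int × Int)) :
    Option (List (Int × Int)) :=
  match PySem.Int.ofStr? (String.mk (rest.takeWhile (· ≠ '-'))) with
  | none => none
  | some v =>
    let r := rest.dropWhile (· ≠ '-')
    if h : r = [] then some (out ++ [(v, depth)])
    else goB (r.dropWhile (· == '-')) ((r.takeWhile (· == '-')).length : Int)
             (out ++ [(v, depth)])
termination_by rest.length
decreasing_by
  have h1 : r.length ≤ rest.length := List.length_dropWhile_le _ _
  have h2 : (r.dropWhile (· == '-')).length ≤ r.length := List.length_dropWhile_le _ _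
  cases hr : r with
  | nil => exact absurd hr h
  | cons c t =>
    have hc : c = '-' := by
      have := List.head_dropWhile_not (· ≠ '-') (l := rest)
      rw [show rest.dropWhile (· ≠ '-') = r from rfl, hr] at this
      simpa using this (by simp)
    have h3 : r.dropWhile (· == '-') = t.dropWhile (· == '-') := by
      rw [hr, hc]; simp [List.dropWhile_cons]
    have h4 : (t.dropWhile (· == '-')).length ≤ t.length := List.length_dropWhile_le _ _
    have h5 : r.length = t.length + 1 := by rw [hr]; simp
    rw [h3]; omega

def read_tokens_alt (s : String) : List (Int × Int) :=
  (goB s.toList 0 []).getD []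

-- ===== PRECONDITION & SPEC =====
-- the number segments of s: the maximal runs of non-dash characters, split at dash runs
-- (leading/trailing/empty runs included, exactly the strings both programs hand to int())
def numSegsGo : List Char → List Char → Bool → List (List Char)
  | [], cur, _ => [cur]
  | c :: t, cur, true => if c = '-' then cur :: numSegsGo t [] false else numSegsGo t (cur ++ [c]) true
  | c :: t, cur, false => if c = '-' then numSegsGo t cur false else numSegsGo t [c] true

def numSegs (cs : List Char) : List (List Char) := numSegsGo cs [] true

-- Pre_ excludes exactly the inputs where Python's int() raises ValueError (both A and B raise
-- there): some segment between dash runs is not an int literal (empty, spaces only, letters, …).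
def Pre_read_tokens (s : String) : Prop :=
  ∀ seg ∈ numSegs s.toList, (PySem.Int.ofStr? (String.mk seg)).isSome = true
instance (s : String) : Decidable (Pre_read_tokens s) := by
  unfold Pre_read_tokens; infer_instance

def pvWitness_read_tokens : String := "1-2--3--4-5"

def Spec_read_tokens (s : String) (out : List (Int × Int)) : Prop := out = read_tokens_alt s
instance (s : String) (out : List (Int × Int)) : Decidable (Spec_read_tokens s out) := by
  unfold Spec_read_tokens; infer_instance

-- ===== CLAIM (what is proved, stated in full; the proofs are below) =====
def Claim_equal_read_tokens : Prop :=
  ∀ (s : String), Dom_read_tokens s → Pre_read_tokens s → Spec_read_tokens s (read_tokens s)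

-- ===== LEMMAS AND PROOFS =====

-- if a run of A's loop ever pushed a failed token (ans = none), the final answer is none
lemma foldA_fst_none : ∀ (cs : List Char) (b : Bool) (ac : List Char) (d : Int),
    (cs.foldl stepA (none, b, ac, d)).1 = none := by
  intro cs
  induction cs with
  | nil => intro b ac d; rfl
  | cons c t ih =>
    intro b ac d
    simp only [List.foldl_cons, stepA]
    cases b <;> split_ifs <;> simp [pushA, ih]

-- while in_num: A appends the whole non-dash prefix to acum_num
lemma num_phase : ∀ (cs : List Char) (ans : Option (List (Int × Int))) (ac : List Char) (d : Int),
    cs.foldl stepA (ans, true, ac, d)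
      = (cs.dropWhile (· ≠ '-')).foldl stepA (ans, true, ac ++ cs.takeWhile (· ≠ '-'), d) := by
  intro cs
  induction cs with
  | nil => simp
  | cons c t ih =>
    intro ans ac d
    by_cases hc : c = '-'
    · subst hc; simp [List.takeWhile_cons, List.dropWhile_cons]
    · have : (stepA (ans, true, ac, d) c) = (ans, true, ac ++ [c], d) := by
        simp [stepA, hc]
      simp only [List.foldl_cons, this, ih]
      simp [List.takeWhile_cons, List.dropWhile_cons, hc]

-- while not in_num: A adds the length of the dash run to acum_depth
lemma dash_phase : ∀ (cs : List Char) (ans : Option (List (Int × Int))) (ac : List Char) (d : Int),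
    cs.foldl stepA (ans, false, ac, d)
      = (cs.dropWhile (· == '-')).foldl stepA
          (ans, false, ac, d + ((cs.takeWhile (· == '-')).length : Int)) := by
  intro cs
  induction cs with
  | nil => simp
  | cons c t ih =>
    intro ans ac d
    by_cases hc : c = '-'
    · subst hc
      have : (stepA (ans, false, ac, d) '-') = (ans, false, ac, d + 1) := by simp [stepA]
      simp only [List.foldl_cons, this, ih]
      simp [List.takeWhile_cons, List.dropWhile_cons]
      ring_nf
    · simp [List.takeWhile_cons, List.dropWhile_cons, hc, stepA]

lemma head_drop_eq : ∀ (cs : List Char) (c : Char) (t : List Char),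
    cs.dropWhile (· == '-') = c :: t → c ≠ '-' := by
  intro cs c t h
  have := List.head_dropWhile_not (· == '-') (l := cs)
  rw [h] at this
  simpa using this (by simp)

lemma ofStr_nil_none : PySem.Int.ofStr? (String.mk ([] : List Char)) = none := by decide

-- the main correspondence: A's state machine started fresh at depth d equals B's scanner
lemma head_drop_ne' : ∀ (cs : List Char) (c : Char) (t : List Char),
    cs.dropWhile (fun x => !decide (x = '-')) = c :: t → c = '-' := by
  intro cs c t h
  have := List.head_dropWhile_not (fun x => !decide (x = '-')) (l := cs)
  rw [h] at this
  simpa using this (by simp)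

lemma mainA : ∀ (n : Nat) (rest : List Char), rest.length ≤ n →
    ∀ (d : Int) (out : List (Int × Int)),
    finishA (rest.foldl stepA (some out, true, [], d)) = goB rest d out := by
  intro n
  induction n with
  | zero =>
    intro rest h d out
    have : rest = [] := List.eq_nil_of_length_eq_zero (Nat.le_zero.mp h)
    subst this
    rw [goB]
    simp only [List.takeWhile_nil, List.dropWhile_nil, List.foldl_nil, finishA, pushA]
    cases hv : PySem.Int.ofStr? (String.mk []) <;> simp
  | succ n ih =>
    intro rest hlen d out
    rw [goB]
    rw [num_phase]
    simp only [ne_eq, decide_not]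
    cases hr : rest.dropWhile (fun x => !decide (x = '-')) with
    | nil =>
      simp only [List.foldl_nil, finishA, pushA]
      cases hv : PySem.Int.ofStr? (String.mk (rest.takeWhile (fun x => !decide (x = '-')))) <;>
        simp [hv]
    | cons c t =>
      have hc : c = '-' := head_drop_ne' rest c t hr
      subst hc
      have hstep : stepA (some out, true, rest.takeWhile (fun x => !decide (x = '-')), d) '-'
          = (pushA (some out) (rest.takeWhile (fun x => !decide (x = '-'))) d, false, [], 1) := by
        simp [stepA]
      simp only [List.foldl_cons, List.nil_append]
      rw [hstep]
      cases hv : PySem.Int.ofStr? (String.mk (rest.takeWhile (fun x => !decide (x = '-')))) with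
      | none =>
        have hpush : pushA (some out) (rest.takeWhile (fun x => !decide (x = '-'))) d = none := by
          simp [pushA, hv]
        rw [hpush]
        have hfn : (t.foldl stepA (none, false, ([] : List Char), (1 : Int))).1 = none :=
          foldA_fst_none t false [] 1
        rcases hstate : t.foldl stepA (none, false, ([] : List Char), (1 : Int)) with
          ⟨a, b2, ac2, d2⟩
        rw [hstate] at hfn
        simp only at hfn
        simp [finishA, hfn, pushA]
      | some v =>
        have hpush : pushA (some out) (rest.takeWhile (fun x => !decide (x = '-'))) d
            = some (out ++ [(v, d)]) := by simp [pushA, hv]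
        rw [hpush, dash_phase]
        -- align B's dash-run length (on '-'::t) with A's (1 + run on t)
        have htk : (('-' :: t).takeWhile (· == '-')) = '-' :: t.takeWhile (· == '-') := by
          simp
        have hdr : (('-' :: t).dropWhile (· == '-')) = t.dropWhile (· == '-') := by
          simp
        simp only [htk, hdr, List.length_cons]
        have hlen2 : (t.dropWhile (· == '-')).length ≤ n := by
          have h1 : ('-' :: t).length ≤ rest.length := by
            rw [← hr]; exact List.length_dropWhile_le _ _
          have h2 : (t.dropWhile (· == '-')).length ≤ t.length :=
            List.length_dropWhile_le _ _
          simp only [List.length_cons] at h1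
          omega
        have hD : ((1 : Int) + ((t.takeWhile (· == '-')).length : Int))
            = (((t.takeWhile (· == '-')).length + 1 : Nat) : Int) := by push_cast; ring
        cases ht2 : t.dropWhile (· == '-') with
        | nil =>
          simp only [List.foldl_nil, finishA]
          rw [goB]
          simp [pushA, ofStr_nil_none]
        | cons c2 t2 =>
          have hc2 : c2 ≠ '-' := head_drop_eq t c2 t2 ht2
          have hstep2 :
              stepA (some (out ++ [(v, d)]), false, ([] : List Char),
                  (1 : Int) + ((t.takeWhile (· == '-')).length : Int)) c2
              = (some (out ++ [(v, d)]), true, [c2],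
                  (1 : Int) + ((t.takeWhile (· == '-')).length : Int)) := by
            simp [stepA, hc2]
          have hibody := ih (c2 :: t2) (by rw [← ht2]; exact hlen2)
            ((1 : Int) + ((t.takeWhile (· == '-')).length : Int)) (out ++ [(v, d)])
          have hre :
              (c2 :: t2).foldl stepA (some (out ++ [(v, d)]), true, ([] : List Char),
                  (1 : Int) + ((t.takeWhile (· == '-')).length : Int))
              = t2.foldl stepA (some (out ++ [(v, d)]), true, [c2],
                  (1 : Int) + ((t.takeWhile (· == '-')).length : Int)) := by
            simp [stepA, hc2]
          rw [hre] at hibody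
          simp only [List.foldl_cons, hstep2]
          rw [hibody, hD]
          simp

-- ===== VERDICT (by name: the statement is the Claim_ definition above) =====
theorem read_tokens_spec : Claim_equal_read_tokens := by
  intro s _ _
  unfold Spec_read_tokens read_tokens read_tokens_alt
  rw [mainA s.toList.length s.toList (le_refl _) 0 []]
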